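-- pv_equiv track=rewrite | github.com/Kkiirraan/Project | load_attention.py | count_char_repeats
-- ===== SOURCE A (Python) =====
-- def count_char_repeats(url):
--     try:
--         repeat_count = 0
--         prev_char = ''
--         for char in url:
--             if char == prev_char:
--                 repeat_count += 1
--             else:
--                 prev_char = char
--         return repeat_count
--     except:
--         return -1
-- ===== SOURCE B (Python) =====
-- from itertools import groupby
--
-- def count_char_repeats(url):
--     try:
--         return sum(sum(1 for _ in g) - 1 for _, g in groupby(url))
--     except:
--         return -1
-- ===== Notes on version B (the rewrite author's own statement) =====
-- stated objective: idiomatic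
-- what changed: Replaces the explicit prev_char loop with itertools.groupby over maximal runs, summing (run length - 1) per run.
import Mathlib
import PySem

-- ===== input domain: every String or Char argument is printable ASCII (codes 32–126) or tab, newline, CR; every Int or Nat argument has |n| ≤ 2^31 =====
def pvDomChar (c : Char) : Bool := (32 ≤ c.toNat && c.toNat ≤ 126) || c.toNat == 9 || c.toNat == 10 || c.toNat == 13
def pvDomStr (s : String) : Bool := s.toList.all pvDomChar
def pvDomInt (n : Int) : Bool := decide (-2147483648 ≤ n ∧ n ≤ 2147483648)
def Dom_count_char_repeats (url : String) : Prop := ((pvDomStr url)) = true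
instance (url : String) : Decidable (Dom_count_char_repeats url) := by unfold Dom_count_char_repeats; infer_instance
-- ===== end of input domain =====

-- B replaces A's prev_char loop with a groupby-style run decomposition, summing (run length - 1) per run (idiomatic; same cost).
-- On a String input A's try/except never fires, so neither port models the -1 branch.

-- ===== PORT A =====
-- the loop state: repeat_count and prev_char ('' initially, modelled as none since '' equals no char)
def pvALoop_count_char_repeats : List Char → Int → Option Char → Int
  | [], cnt, _ => cnt
  | c :: rest, cnt, prev =>
      if some c = prev then pvALoop_count_char_repeats rest (cnt + 1) prev
      else pvALoop_count_char_repeats rest cnt (some c)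

def count_char_repeats (url : String) : Int :=
  pvALoop_count_char_repeats url.toList 0 none

-- ===== PORT B =====
-- groupby: split off the maximal run of a character; (length of rest of run, remainder)
def pvRun_count_char_repeats (c : Char) : List Char → Nat × List Char
  | [] => (0, [])
  | d :: r =>
      if d = c then
        let p := pvRun_count_char_repeats c r
        (p.1 + 1, p.2)
      else (0, d :: r)

theorem pvRun_length_le (c : Char) (l : List Char) :
    (pvRun_count_char_repeats c l).2.length ≤ l.length := by
  induction l with
  | nil => simp [pvRun_count_char_repeats]
  | cons d r ih =>
      simp only [pvRun_count_char_repeats]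
      split
      · exact Nat.le_trans ih (Nat.le_succ _)
      · simp

-- sum over groups of (group length - 1)
def pvBSum_count_char_repeats : List Char → Int
  | [] => 0
  | c :: rest =>
      let p := pvRun_count_char_repeats c rest
      (p.1 : Int) + pvBSum_count_char_repeats p.2
termination_by l => l.length
decreasing_by
  exact Nat.lt_succ_of_le (pvRun_length_le c rest)

def count_char_repeats_alt (url : String) : Int :=
  pvBSum_count_char_repeats url.toList

-- ===== PRECONDITION & SPEC =====
def Spec_count_char_repeats (url : String) (out : Int) : Prop := out = count_char_repeats_alt url
instance (url : String) (out : Int) : Decidable (Spec_count_char_repeats url out) := by unfold Spec_count_char_repeats; infer_instance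

-- ===== CLAIM (what is proved, stated in full; the proofs are below) =====
def Claim_equal_count_char_repeats : Prop := ∀ (url : String), Dom_count_char_repeats url → Spec_count_char_repeats url (count_char_repeats url)

-- ===== LEMMAS AND PROOFS =====

theorem pvALoop_some (l : List Char) : ∀ (cnt : Int) (c : Char),
    pvALoop_count_char_repeats l cnt (some c) =
      cnt + ((pvRun_count_char_repeats c l).1 : Int)
        + pvBSum_count_char_repeats (pvRun_count_char_repeats c l).2 := by
  induction l with
  | nil => intro cnt c; simp [pvALoop_count_char_repeats, pvRun_count_char_repeats, pvBSum_count_char_repeats]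
  | cons d r ih =>
      intro cnt c
      by_cases h : d = c
      · subst h
        simp only [pvALoop_count_char_repeats, pvRun_count_char_repeats]
        rw [ih]
        push_cast
        ring
      · simp only [pvALoop_count_char_repeats, pvRun_count_char_repeats,
          Option.some.injEq, if_neg h]
        rw [ih]
        simp only [pvBSum_count_char_repeats]
        push_cast
        ring

theorem pvALoop_none (l : List Char) (cnt : Int) :
    pvALoop_count_char_repeats l cnt none = cnt + pvBSum_count_char_repeats l := by
  cases l with
  | nil => simp [pvALoop_count_char_repeats, pvBSum_count_char_repeats]
  | cons c rest =>
      rw [show pvALoop_count_char_repeats (c :: rest) cnt none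
            = pvALoop_count_char_repeats rest cnt (some c) from by
          simp [pvALoop_count_char_repeats], pvALoop_some]
      simp only [pvBSum_count_char_repeats]
      ring

-- ===== VERDICT (by name: the statement is the Claim_ definition above) =====
theorem count_char_repeats_spec : Claim_equal_count_char_repeats := by
  intro url _
  unfold Spec_count_char_repeats count_char_repeats count_char_repeats_alt
  rw [pvALoop_none]
  ring
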